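-- pv_equiv track=rewrite | github.com/WillyLutz/FireLearnConsole | scripts/processing.py | generate_harmonics
-- ===== SOURCE A (Python) =====
-- def generate_harmonics(freq, nth, mode):
--     harmonics = []
--     step = freq
--     if mode == 'All':
--         for i in range(nth):
--             harmonics.append(freq)
--             freq = freq + step
--     if mode == "Even":
--         for i in range(nth):
--             if i % 2 == 0:
--                 harmonics.append(freq)
--                 freq = freq + step
--     if mode == "Odd":
--         for i in range(nth):
--             if i % 2 == 1:
--                 harmonics.append(freq)
--                 freq = freq + step
--     return harmonics
-- ===== SOURCE B (Python) =====
-- def generate_harmonics(freq, nth, mode):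
--     if mode == 'All':
--         count = nth
--     elif mode == 'Even':
--         count = (nth + 1) // 2
--     elif mode == 'Odd':
--         count = nth // 2
--     else:
--         count = 0
--     return [freq * k for k in range(1, count + 1)]
-- ===== Notes on version B (the rewrite author's own statement) =====
-- stated objective: simpler
-- what changed: Replaces A's three conditional-skip loops with state mutation by a mode-derived harmonic count (nth, (nth+1)//2, nth//2, or 0) and a closed-form comprehension [freq*k for k in range(1, count+1)].
import Mathlib
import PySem

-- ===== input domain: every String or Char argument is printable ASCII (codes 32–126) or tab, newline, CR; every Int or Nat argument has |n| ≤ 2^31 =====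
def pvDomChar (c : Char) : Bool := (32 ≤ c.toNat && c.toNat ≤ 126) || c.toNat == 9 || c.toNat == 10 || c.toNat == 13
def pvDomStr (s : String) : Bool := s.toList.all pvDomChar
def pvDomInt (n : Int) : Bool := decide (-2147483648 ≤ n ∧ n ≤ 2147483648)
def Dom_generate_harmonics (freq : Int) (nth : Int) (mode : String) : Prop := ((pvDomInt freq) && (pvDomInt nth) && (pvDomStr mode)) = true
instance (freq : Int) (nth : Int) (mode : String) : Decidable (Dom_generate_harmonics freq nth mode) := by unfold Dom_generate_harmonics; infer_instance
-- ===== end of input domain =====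

-- B replaces A's three conditional-skip loops by a mode-derived harmonic count and a
-- closed-form comprehension [freq*k for k in range(1, count+1)] (simpler decomposition).

-- ===== PORT A =====
def generate_harmonics (freq : Int) (nth : Int) (mode : String) : List Int :=
  let harmonics : List Int := []
  let step := freq
  let s1 : List Int × Int :=
    if mode = "All" then
      (PySem.List.pyRange 0 nth 1).foldl (fun s _ => (s.1 ++ [s.2], s.2 + step)) (harmonics, freq)
    else (harmonics, freq)
  let s2 : List Int × Int :=
    if mode = "Even" then
      (PySem.List.pyRange 0 nth 1).foldl
        (fun s i => if PySem.Int.mod i 2 = 0 then (s.1 ++ [s.2], s.2 + step) else s) s1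
    else s1
  let s3 : List Int × Int :=
    if mode = "Odd" then
      (PySem.List.pyRange 0 nth 1).foldl
        (fun s i => if PySem.Int.mod i 2 = 1 then (s.1 ++ [s.2], s.2 + step) else s) s2
    else s2
  s3.1

-- ===== PORT B =====
def generate_harmonics_alt (freq : Int) (nth : Int) (mode : String) : List Int :=
  let count : Int :=
    if mode = "All" then nth
    else if mode = "Even" then PySem.Int.floordiv (nth + 1) 2
    else if mode = "Odd" then PySem.Int.floordiv nth 2
    else 0
  (PySem.List.pyRange 1 (count + 1) 1).map (fun k => freq * k)

-- ===== PRECONDITION & SPEC =====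
def Spec_generate_harmonics (freq : Int) (nth : Int) (mode : String) (out : List Int) : Prop := out = generate_harmonics_alt freq nth mode
instance (freq : Int) (nth : Int) (mode : String) (out : List Int) : Decidable (Spec_generate_harmonics freq nth mode out) := by unfold Spec_generate_harmonics; infer_instance

-- ===== CLAIM (what is proved, stated in full; the proofs are below) =====
def Claim_equal_generate_harmonics : Prop := ∀ (freq : Int) (nth : Int) (mode : String), Dom_generate_harmonics freq nth mode → Spec_generate_harmonics freq nth mode (generate_harmonics freq nth mode)

-- ===== LEMMAS AND PROOFS =====

-- A's 'All' loop ignores the loop index; length alone matters.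
theorem allLoop (step : Int) : ∀ (l : List Int) (acc : List Int) (f : Int),
    l.foldl (fun (s : List Int × Int) _ => (s.1 ++ [s.2], s.2 + step)) (acc, f)
      = (acc ++ (List.range l.length).map (fun j : Nat => f + (j : Int) * step), f + l.length * step) := by
  intro l
  induction l with
  | nil => intro acc f; simp
  | cons x xs ih =>
      intro acc f
      simp only [List.foldl_cons, ih, List.length_cons, Prod.mk.injEq]
      refine ⟨?_, by push_cast; ring⟩
      have hmap : List.map ((fun j : Nat => f + (j : Int) * step) ∘ Nat.succ) (List.range xs.length)
          = List.map (fun j : Nat => f + step + (j : Int) * step) (List.range xs.length) := by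
        apply List.map_congr_left; intro j _
        simp only [Function.comp_apply]; push_cast; ring
      rw [List.range_succ_eq_map, List.map_cons, List.map_map, hmap]
      simp [List.append_assoc]

-- A's 'Even' loop over range(n) appends ⌈n/2⌉ harmonics.
theorem evenLoop (step : Int) : ∀ (n : Nat) (acc : List Int) (f : Int),
    (PySem.List.pyRange 0 (n : Int) 1).foldl
        (fun (s : List Int × Int) i => if PySem.Int.mod i 2 = 0 then (s.1 ++ [s.2], s.2 + step) else s) (acc, f)
      = (acc ++ (List.range ((n + 1) / 2)).map (fun j : Nat => f + (j : Int) * step), f + ((n + 1) / 2 : Nat) * step) := by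
  intro n
  induction n with
  | zero => intro acc f; simp
  | succ n ih =>
      intro acc f
      have hsplit : PySem.List.pyRange 0 ((n + 1 : Nat) : Int) 1
          = PySem.List.pyRange 0 (n : Int) 1 ++ [(n : Int)] := by
        have := PySem.List.pyRange_one_succ_right (a := 0) (b := (n : Int)) (by positivity)
        push_cast
        exact this
      rw [hsplit, List.foldl_append, ih]
      by_cases hpar : n % 2 = 0
      · have hmod : PySem.Int.mod (n : Int) 2 = 0 := by
          have h := PySem.Int.mod_natCast n 2
          rw [hpar] at h; exact_mod_cast h
        have hc : (n + 1 + 1) / 2 = (n + 1) / 2 + 1 := by omega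
        simp only [List.foldl_cons, List.foldl_nil, hmod, hc]
        rw [Prod.mk.injEq]
        constructor
        · rw [List.range_succ]; simp [List.append_assoc]
        · push_cast; ring
      · have hmod : PySem.Int.mod (n : Int) 2 = 1 := by
          have h := PySem.Int.mod_natCast n 2
          have h1 : n % 2 = 1 := by omega
          rw [h1] at h; exact_mod_cast h
        have hc : (n + 1 + 1) / 2 = (n + 1) / 2 := by omega
        simp only [List.foldl_cons, List.foldl_nil, hmod, hc]
        norm_num

-- A's 'Odd' loop over range(n) appends ⌊n/2⌋ harmonics.
theorem oddLoop (step : Int) : ∀ (n : Nat) (acc : List Int) (f : Int),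
    (PySem.List.pyRange 0 (n : Int) 1).foldl
        (fun (s : List Int × Int) i => if PySem.Int.mod i 2 = 1 then (s.1 ++ [s.2], s.2 + step) else s) (acc, f)
      = (acc ++ (List.range (n / 2)).map (fun j : Nat => f + (j : Int) * step), f + (n / 2 : Nat) * step) := by
  intro n
  induction n with
  | zero => intro acc f; simp
  | succ n ih =>
      intro acc f
      have hsplit : PySem.List.pyRange 0 ((n + 1 : Nat) : Int) 1
          = PySem.List.pyRange 0 (n : Int) 1 ++ [(n : Int)] := by
        have := PySem.List.pyRange_one_succ_right (a := 0) (b := (n : Int)) (by positivity)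
        push_cast
        exact this
      rw [hsplit, List.foldl_append, ih]
      by_cases hpar : n % 2 = 1
      · have hmod : PySem.Int.mod (n : Int) 2 = 1 := by
          have h := PySem.Int.mod_natCast n 2
          rw [hpar] at h; exact_mod_cast h
        have hc : (n + 1) / 2 = n / 2 + 1 := by omega
        simp only [List.foldl_cons, List.foldl_nil, hmod, hc]
        rw [Prod.mk.injEq]
        constructor
        · rw [List.range_succ]; simp [List.append_assoc]
        · push_cast; ring
      · have hmod : PySem.Int.mod (n : Int) 2 = 0 := by
          have h := PySem.Int.mod_natCast n 2
          have h0 : n % 2 = 0 := by omega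
          rw [h0] at h; exact_mod_cast h
        have hc : (n + 1) / 2 = n / 2 := by omega
        simp only [List.foldl_cons, List.foldl_nil, hmod, hc]
        norm_num

-- B's comprehension over range(1, c+1) written over List.range c.
theorem altRange (freq : Int) (c : Nat) :
    (PySem.List.pyRange 1 ((c : Int) + 1) 1).map (fun k => freq * k)
      = (List.range c).map (fun j : Nat => freq + (j : Int) * freq) := by
  rw [PySem.List.pyRange_one]
  have : ((c : Int) + 1 - 1).toNat = c := by omega
  rw [this, List.map_map]
  apply List.map_congr_left
  intro j _
  simp [Function.comp]
  ring

theorem alt_nonpos (freq : Int) (c : Int) (hc : c ≤ 0) :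
    (PySem.List.pyRange 1 (c + 1) 1).map (fun k => freq * k) = [] := by
  rw [PySem.List.pyRange_one_eq_nil (by omega)]
  rfl

-- ===== VERDICT (by name: the statement is the Claim_ definition above) =====
theorem generate_harmonics_spec : Claim_equal_generate_harmonics := by
  intro freq nth mode _
  unfold Spec_generate_harmonics generate_harmonics generate_harmonics_alt
  simp only []
  by_cases hA : mode = "All"
  · subst hA
    rw [if_pos rfl, if_neg (show ("All" : String) ≠ "Even" by decide),
      if_neg (show ("All" : String) ≠ "Odd" by decide), if_pos rfl]
    by_cases hn : 0 ≤ nth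
    · obtain ⟨n, rfl⟩ : ∃ m : Nat, nth = (m : Int) := ⟨nth.toNat, by omega⟩
      rw [allLoop freq (PySem.List.pyRange 0 (n : Int) 1) [] freq]
      have hl : (PySem.List.pyRange 0 (n : Int) 1).length = n := by
        rw [PySem.List.length_pyRange_one]; omega
      rw [hl]
      simp only [List.nil_append]
      exact (altRange freq n).symm
    · rw [PySem.List.pyRange_one_eq_nil (by omega), alt_nonpos freq nth (by omega)]
      rfl
  · by_cases hE : mode = "Even"
    · subst hE
      rw [if_neg (show ("Even" : String) ≠ "All" by decide), if_pos rfl,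
        if_neg (show ("Even" : String) ≠ "Odd" by decide),
        if_neg (show ("Even" : String) ≠ "All" by decide), if_pos rfl]
      by_cases hn : 0 ≤ nth
      · obtain ⟨n, rfl⟩ : ∃ m : Nat, nth = (m : Int) := ⟨nth.toNat, by omega⟩
        rw [evenLoop freq n [] freq]
        have hfd : PySem.Int.floordiv ((n : Int) + 1) 2 = (((n + 1) / 2 : Nat) : Int) := by
          have h := PySem.Int.floordiv_natCast (n + 1) 2
          exact_mod_cast h
        rw [hfd]
        simp only [List.nil_append]
        exact (altRange freq ((n + 1) / 2)).symm
      · have hfd : PySem.Int.floordiv (nth + 1) 2 ≤ 0 := by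
          have h := (PySem.Int.floordiv_lt_iff_lt_mul (a := nth + 1) (b := 2) (q := 1) (by omega)).mpr (by omega)
          linarith
        rw [PySem.List.pyRange_one_eq_nil (by omega), alt_nonpos freq _ hfd]
        rfl
    · by_cases hO : mode = "Odd"
      · subst hO
        rw [if_neg (show ("Odd" : String) ≠ "All" by decide),
          if_neg (show ("Odd" : String) ≠ "Even" by decide), if_pos rfl,
          if_neg (show ("Odd" : String) ≠ "All" by decide),
          if_neg (show ("Odd" : String) ≠ "Even" by decide), if_pos rfl]
        by_cases hn : 0 ≤ nth
        · obtain ⟨n, rfl⟩ : ∃ m : Nat, nth = (m : Int) := ⟨nth.toNat, by omega⟩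
          have hfd : PySem.Int.floordiv (n : Int) 2 = ((n / 2 : Nat) : Int) := by
            have h := PySem.Int.floordiv_natCast n 2
            exact_mod_cast h
          rw [oddLoop freq n [] freq, hfd]
          simp only [List.nil_append]
          exact (altRange freq (n / 2)).symm
        · have hfd : PySem.Int.floordiv nth 2 ≤ 0 := by
            have h := (PySem.Int.floordiv_lt_iff_lt_mul (a := nth) (b := 2) (q := 1) (by omega)).mpr (by omega)
            linarith
          rw [PySem.List.pyRange_one_eq_nil (by omega), alt_nonpos freq _ hfd]
          rfl
      · rw [if_neg hA, if_neg hE, if_neg hO, if_neg hA, if_neg hE, if_neg hO,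
          alt_nonpos freq 0 (by omega)]
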